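-- pv_equiv track=rewrite | github.com/Alexandru-S/Code_Solutions | 3m/solution3.py | find
-- ===== SOURCE A (Python) =====
-- def find(the_list):
--     """
--     Function that takes in a list of integers representing
--     the floors of a building.
--
--     The below code takes in a number of floors and calculates which
--     is the most optimal floor that can have the most amount of integers from
--     the input list that fit inside the lower bounds of the floors.
--
--     The definition of 'most integers' is that as long as the
--     items_in_lower_range tracker is higher than the theoretical limit
--     calculated by (lower_ceiling- lower floor +1)
--
--     Args:
--         the_list (list): integers of different
--
--     Returns:
--         int: most optimal floor
--
--     """
--     floor = 1
--     ceiling = len(the_list) - 1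
--
--     while floor < ceiling:
--         midpoint = floor + (
--             (ceiling - floor) // 2
--         )  # calculates midpoint, which is from 1 to
--         lower_floor, lower_ceiling = (
--             floor,
--             midpoint,
--         )  # lower floor bound, lower ceiling bound
--         upper_floor, upper_ceiling = (
--             midpoint + 1,
--             ceiling,
--         )  # upper floor bound, upper ceiling bound
--
--         items_in_lower_range = 0
--         for item in the_list:
--             if (
--                 item >= lower_floor and item <= lower_ceiling
--             ):  # check if item in list is below the lower floor and ceiling bounds
--                 items_in_lower_range += 1  # if yes, increment items_in_lower_range by 1
--         distinct_possible_integers_in_lower_range = (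
--             lower_ceiling - lower_floor + 1
--         )  # tracking the difference between the lower ceiling and floor for possible max
--         if (
--             items_in_lower_range > distinct_possible_integers_in_lower_range
--         ):  # if there are more items in the counter than theoretically possible, go to the lower bound and repeat cycle
--             floor, ceiling = (
--                 lower_floor,
--                 lower_ceiling,
--             )  # thus new floor will be the lower floor and new ceiling will be lower ceiling
--         else:
--             floor, ceiling = (
--                 upper_floor,
--                 upper_ceiling,
--             )  # if not, go up one section and increase the floor bounds
--     return floor
-- ===== SOURCE B (Python) =====
-- def find(the_list):
--     ceiling = len(the_list) - 1
--     floor = 1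
--     if not floor < ceiling:
--         return floor
--     # one pass: count occurrences of each value in the candidate range 1..ceiling
--     cnt = {}
--     for x in the_list:
--         if 1 <= x <= ceiling:
--             cnt[x] = cnt.get(x, 0) + 1
--     # prefix sums: pref[v] = number of items in [1, v]
--     pref = [0]
--     for v in range(1, ceiling + 1):
--         pref.append(pref[v - 1] + cnt.get(v, 0))
--     # same range-halving search, but each range count is an O(1) lookup
--     while floor < ceiling:
--         midpoint = floor + (ceiling - floor) // 2
--         if pref[midpoint] - pref[floor - 1] > midpoint - floor + 1:
--             ceiling = midpoint
--         else:
--             floor = midpoint + 1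
--     return floor
-- ===== Notes on version B (the rewrite author's own statement) =====
-- stated objective: faster
-- what changed: B precomputes a frequency counter and a prefix-sum array in one pass, so each halving step's range count becomes an O(1) prefix-sum lookup instead of A's O(n) scan over the whole list.
import Mathlib
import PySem

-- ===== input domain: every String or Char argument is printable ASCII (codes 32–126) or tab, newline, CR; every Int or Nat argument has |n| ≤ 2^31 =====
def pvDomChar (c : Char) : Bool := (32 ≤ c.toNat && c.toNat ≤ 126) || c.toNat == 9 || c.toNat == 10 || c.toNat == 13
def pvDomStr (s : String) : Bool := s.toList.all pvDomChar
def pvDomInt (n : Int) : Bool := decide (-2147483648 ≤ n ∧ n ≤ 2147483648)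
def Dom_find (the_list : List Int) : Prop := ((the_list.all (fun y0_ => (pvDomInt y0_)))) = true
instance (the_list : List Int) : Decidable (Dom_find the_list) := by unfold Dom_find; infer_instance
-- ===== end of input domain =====

-- B replaces A's O(n) count scan per halving step by a one-pass frequency counter plus a
-- prefix-sum array, making each range count an O(1) lookup (objective: faster, asymptotic).

-- ===== PORT A =====
-- inner for-loop of A: count items in [lo, hi]
def findCount (the_list : List Int) (lo hi : Int) : Int :=
  the_list.foldl (fun acc item => if lo ≤ item ∧ item ≤ hi then acc + 1 else acc) 0

-- A's while loop; the Nat argument is fuel only: the loop strictly shrinks ceiling - floor each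
-- iteration, so fuel (ceiling - floor).toNat makes the guard `floor < ceiling` fail before fuel runs out
def findLoop (the_list : List Int) : Nat → Int → Int → Int
  | 0, floor, _ => floor
  | Nat.succ n, floor, ceiling =>
    if floor < ceiling then
      let midpoint := floor + PySem.Int.floordiv (ceiling - floor) 2
      if findCount the_list floor midpoint > midpoint - floor + 1 then
        findLoop the_list n floor midpoint
      else
        findLoop the_list n (midpoint + 1) ceiling
    else floor

def find (the_list : List Int) : Int :=
  findLoop the_list (((the_list.length : Int) - 1) - 1).toNat 1 ((the_list.length : Int) - 1)

-- ===== PORT B =====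
-- B's counting pass: cnt[x] = cnt.get(x, 0) + 1 for x in [1, ceiling]
def altCnt (the_list : List Int) (ceiling : Int) : PySem.Dict Int Int :=
  the_list.foldl
    (fun cnt x => if 1 ≤ x ∧ x ≤ ceiling then cnt.insert x (cnt.getD x 0 + 1) else cnt)
    PySem.Dict.empty

-- B's prefix-sum pass: pref = [0]; for v in range(1, ceiling+1): pref.append(pref[v-1] + cnt.get(v, 0))
def altPref (cnt : PySem.Dict Int Int) (ceiling : Int) : List Int :=
  (PySem.List.pyRange 1 (ceiling + 1) 1).foldl
    (fun pref v => pref ++ [PySem.List.pyGetD pref (v - 1) 0 + cnt.getD v 0]) [0]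

-- B's while loop (same fuel scheme as A's): range counts via prefix-sum lookups
-- (indices provably in range; pyGetD = plain indexing there)
def altLoop (pref : List Int) : Nat → Int → Int → Int
  | 0, floor, _ => floor
  | Nat.succ n, floor, ceiling =>
    if floor < ceiling then
      let midpoint := floor + PySem.Int.floordiv (ceiling - floor) 2
      if PySem.List.pyGetD pref midpoint 0 - PySem.List.pyGetD pref (floor - 1) 0 > midpoint - floor + 1 then
        altLoop pref n floor midpoint
      else
        altLoop pref n (midpoint + 1) ceiling
    else floor

def find_alt (the_list : List Int) : Int :=
  let ceiling := (the_list.length : Int) - 1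
  let floor : Int := 1
  if floor < ceiling then
    altLoop (altPref (altCnt the_list ceiling) ceiling) (ceiling - floor).toNat floor ceiling
  else floor

-- ===== PRECONDITION & SPEC =====
def Spec_find (the_list : List Int) (out : Int) : Prop := out = find_alt the_list
instance (the_list : List Int) (out : Int) : Decidable (Spec_find the_list out) := by unfold Spec_find; infer_instance

-- ===== CLAIM (what is proved, stated in full; the proofs are below) =====
def Claim_equal_find : Prop := ∀ (the_list : List Int), Dom_find the_list → Spec_find the_list (find the_list)

-- ===== LEMMAS AND PROOFS =====

-- midpoint bounds inside the loop
theorem pvMidBounds (f c : Int) (h : f < c) :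
    f ≤ f + PySem.Int.floordiv (c - f) 2 ∧ f + PySem.Int.floordiv (c - f) 2 < c := by
  rw [PySem.Int.floordiv_eq_ediv_of_pos (by norm_num)]
  omega

-- the running prefix value: number of items in [1, v]
def pvC (the_list : List Int) (v : Int) : Int :=
  (the_list.countP (fun x => decide (1 ≤ x ∧ x ≤ v)) : Int)

theorem pvC_zero (l : List Int) : pvC l 0 = 0 := by
  unfold pvC
  rw [List.countP_eq_zero.mpr]
  · rfl
  · intro x _ h
    simp at h
    omega

theorem pvC_succ (l : List Int) (v : Int) (hv : 1 ≤ v) :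
    pvC l v = pvC l (v - 1) + (l.count v : Int) := by
  unfold pvC
  induction l with
  | nil => simp
  | cons x t ih =>
    simp only [List.countP_cons, List.count_cons, decide_eq_true_eq, beq_iff_eq]
    push_cast
    push_cast at ih
    split_ifs <;> omega

-- A's inner scan is a prefix-sum difference
theorem pvCount_eq (l : List Int) (lo hi : Int) (hlo : 1 ≤ lo) (hhi : lo - 1 ≤ hi) :
    findCount l lo hi = pvC l hi - pvC l (lo - 1) := by
  unfold findCount pvC
  rw [PySem.List.foldl_ite_add_one]
  have key : l.countP (fun x => decide (1 ≤ x ∧ x ≤ hi)) =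
      l.countP (fun x => decide (lo ≤ x ∧ x ≤ hi)) + l.countP (fun x => decide (1 ≤ x ∧ x ≤ lo - 1)) := by
    induction l with
    | nil => simp
    | cons x t ih =>
      simp only [List.countP_cons, decide_eq_true_eq]
      split_ifs <;> omega
  push_cast [key]
  ring

-- the counter lookup is the plain count, for keys inside [1, ceiling]
theorem pvCnt_getD (l : List Int) (c v : Int) (h1 : 1 ≤ v) (h2 : v ≤ c) :
    (altCnt l c).getD v 0 = (l.count v : Int) := by
  unfold altCnt
  rw [PySem.List.foldl_ite_eq_foldl_filter]
  rw [PySem.Dict.getD_foldl_insert_add_one]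
  rw [PySem.Dict.getD_empty]
  rw [List.count_filter (by simp; omega)]
  simp

-- the prefix array is the table of pvC
theorem pvPref_eq (l : List Int) (c : Int) (hc : 0 ≤ c) :
    altPref (altCnt l c) c = (List.range (c.toNat + 1)).map (fun i : Nat => pvC l (i : Int)) := by
  unfold altPref
  have main : ∀ k : Nat, k ≤ c.toNat →
      (PySem.List.pyRange 1 ((k : Int) + 1) 1).foldl
        (fun pref v => pref ++ [PySem.List.pyGetD pref (v - 1) 0 + (altCnt l c).getD v 0]) [0] =
      (List.range (k + 1)).map (fun i : Nat => pvC l (i : Int)) := by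
    intro k hk
    induction k with
    | zero =>
      rw [show ((0 : Nat) : Int) + 1 = 1 by norm_num,
          PySem.List.pyRange_one_eq_nil (by omega)]
      simp [pvC_zero]
    | succ n ih =>
      have hn : n ≤ c.toNat := by omega
      rw [show (((n + 1 : Nat) : Int) + 1) = ((n : Int) + 1) + 1 by push_cast; ring,
          PySem.List.pyRange_one_succ_right (by omega), List.foldl_append, ih hn]
      simp only [List.foldl_cons, List.foldl_nil]
      have hidx : PySem.List.pyGetD ((List.range (n + 1)).map (fun i : Nat => pvC l (i : Int))) ((n : Int) + 1 - 1) 0 = pvC l (n : Int) := by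
        rw [show ((n : Int) + 1 - 1) = ((n : Nat) : Int) by ring,
            PySem.List.pyGetD_of_nonneg _ _ (by omega)]
        rw [Int.toNat_natCast]
        rw [PySem.List.getD_map_range _ _ _ _ (by omega)]
      rw [hidx, pvCnt_getD l c ((n : Int) + 1) (by omega) (by omega)]
      have hstep : pvC l ((n : Int) + 1) = pvC l (n : Int) + (l.count ((n : Int) + 1) : Int) := by
        have h := pvC_succ l ((n : Int) + 1) (by omega)
        simpa using h
      conv_rhs => rw [List.range_succ]
      rw [List.map_append]
      simp only [List.map_cons, List.map_nil]
      congr 1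
      push_cast
      rw [hstep]
  have := main c.toNat (le_refl _)
  rwa [Int.toNat_of_nonneg hc] at this

-- indexing the table
theorem pvPref_get (l : List Int) (c i : Int) (hc : 0 ≤ c) (h0 : 0 ≤ i) (h1 : i ≤ c) :
    PySem.List.pyGetD (altPref (altCnt l c) c) i 0 = pvC l i := by
  rw [pvPref_eq l c hc, PySem.List.pyGetD_of_nonneg _ _ h0,
      PySem.List.getD_map_range _ _ _ _ (by omega)]
  congr 1
  omega

-- the two loops agree step for step when the prefix table covers [0, c]
theorem pvLoop_eq (l : List Int) (c : Int) (hc : 0 ≤ c) :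
    ∀ (n : Nat) (floor ceiling : Int), 1 ≤ floor → ceiling ≤ c →
      findLoop l n floor ceiling = altLoop (altPref (altCnt l c) c) n floor ceiling := by
  intro n
  induction n with
  | zero => intro floor ceiling _ _; rfl
  | succ n ih =>
    intro floor ceiling hf hcc
    simp only [findLoop, altLoop]
    by_cases h : floor < ceiling
    · simp only [h, if_true]
      have hm := pvMidBounds floor ceiling h
      set m := floor + PySem.Int.floordiv (ceiling - floor) 2 with hmdef
      have hcount : findCount l floor m = PySem.List.pyGetD (altPref (altCnt l c) c) m 0 - PySem.List.pyGetD (altPref (altCnt l c) c) (floor - 1) 0 := by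
        rw [pvPref_get l c m hc (by omega) (by omega),
            pvPref_get l c (floor - 1) hc (by omega) (by omega),
            pvCount_eq l floor m hf (by omega)]
      rw [hcount]
      by_cases hb : PySem.List.pyGetD (altPref (altCnt l c) c) m 0 - PySem.List.pyGetD (altPref (altCnt l c) c) (floor - 1) 0 > m - floor + 1
      · simp only [hb, if_true]
        exact ih floor m hf (by omega)
      · simp only [hb, if_false]
        exact ih (m + 1) ceiling (by omega) hcc
    · simp [h]

-- ===== VERDICT (by name: the statement is the Claim_ definition above) =====
theorem find_spec : Claim_equal_find := by
  intro l _
  unfold Spec_find find find_alt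
  by_cases h : (1 : Int) < (l.length : Int) - 1
  · simp only [h, if_true]
    exact pvLoop_eq l ((l.length : Int) - 1) (by omega) _ 1 ((l.length : Int) - 1) (by omega) (le_refl _)
  · simp only [h, if_false]
    cases hfuel : (((l.length : Int) - 1) - 1).toNat with
    | zero => rfl
    | succ n => simp [findLoop, h]
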